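/- GENERATED by tools/from_farm_form.py from farm/worked/calloc/Proof.lean (a worked proof of the farm's unit `calloc`,
   accepted by the verdict) — do not edit. -/
import ProgX.Base.Spec.Units.calloc

open X86 X86.User Asan ProgX.Base

set_option maxRecDepth 4000
set_option maxHeartbeats 4000000

/-- `calloc` (c/base/heap.c; 0x103500 in the base image, 25 instructions) satisfies `ProgX.Base.Spec.calloc.spec`, given the contracts of
`heap_product_ok`, `malloc` and libc's `memset`.
(Carried over from agent GA's proof against its test image, c/heap/heaptest.elf: tools/port_heap_units.py.) -/
theorem ProgX.Base.Spec.Proved.calloc_ok : ProgX.Base.Spec.calloc.Statement := by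
  intro Lay hLay μ hμ u₀ hcode hproduct h_malloc h_memset H rest frames u ret he hpre
  have hmalloc := h_malloc H rest frames
  have hmemset := h_memset
    ((H.push ((u.reg .rdi).toNat * (u.reg .rsi).toNat) (r16 ((u.reg .rdi).toNat * (u.reg .rsi).toNat))).liveObjs ++ rest) frames
  v_entry he
  have hok := hpre.inv.heap
  have hbase := hpre.base
  have hlimit := hpre.limit
  have hroom := hok.room
  rw [hbase, hlimit] at hroom
  u_walk hcode [hμ.vendor] span [ProgX.Base.L.textLo, ProgX.Base.L.textHi] side (v_side)
  case call_inv =>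
    v_inv
  case pre_10350c =>
    trivial
  case cont =>
    -- after `heap_product_ok(k, s)`: rax = 1 (go on) or 0 (NULL)
    have hk : s_10350c.reg .rdi = u.reg .rdi := w_kept_10350c.get .rdi (by rfl)
    have hs : s_10350c.reg .rsi = u.reg .rsi := w_kept_10350c.get .rsi (by rfl)
    obtain ⟨hmemeq, hyes, hno⟩ := w_post
    rw [hk, hs] at hyes hno
    rw [w_mem_10350c] at hmemeq
    obtain ⟨rv, hrv⟩ : ∃ rv, s_10350cr.reg .rax = rv := ⟨_, rfl⟩
    rw [hrv] at hyes hno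
    v_after_call w_rsp_10350c w_mem_10350c
    clear w_same
    have hpart : (Word.part Width.w32 rv).toNat = rv.toNat % 2 ^ 32 := part32_toNat rv
    u_walk hcode [hμ.vendor] span [ProgX.Base.L.textLo, ProgX.Base.L.textHi] side (v_side)
    case call_inv =>
      v_inv
    case pre_10351c =>
      -- the precondition of `malloc(k * s)`
      have hun : ShadowUntouched u.mem s_10351c.mem := by v_untouched
      refine hpre.callee hun ?_ ?_ ?_ ?_
      · rw [hbase, hlimit]
        u_memnorm
        u_eqon
      · rw [w_rsp]
        u_omega
      · rw [w_rsp]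
        u_omega
      · rw [w_rsp]
        u_omega
    case cont =>
      -- `heap_product_ok` said no: NULL; the product does not fit the heap
      have hnot : ¬ ((u.reg .rdi).toNat = 0 ∨ (u.reg .rsi).toNat = 0 ∨
          ((u.reg .rdi).toNat ≤ 4194272 ∧ (u.reg .rsi).toNat ≤ 4194272)) := by
        intro hy
        have := hyes hy
        omega
      have hbig : 4194272 < (u.reg .rdi).toNat * (u.reg .rsi).toNat :=
        ProgX.Spec.mul_gt_of_factor_gt (by omega) (by omega) (by omega)
      have hnf : ¬ H.Fits (r16 ((u.reg .rdi).toNat * (u.reg .rsi).toNat)) := by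
        have hle := le_r16 ((u.reg .rdi).toNat * (u.reg .rsi).toNat)
        unfold Heap.Fits
        rw [hbase, hlimit]
        omega
      have hp1 : UInt64.ofNat (s_10350cr.mem.readLE (u.reg .rsp - 8) 8) = u.reg .rbp := by u_resolve
      have hp2 : UInt64.ofNat (s_10350cr.mem.readLE (u.reg .rsp - 16) 8) = u.reg .rbx := by u_resolve
      have hp0 : UInt64.ofNat (s_10350cr.mem.readLE (u.reg .rsp) 8) = ret := by
        rw [hmemeq]
        u_frame he_retAddr
      u_walk hcode [hμ.vendor] span [ProgX.Base.L.textLo, ProgX.Base.L.textHi] side (v_side)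
      refine ReachVia.done ?_
      v_returned
      refine ⟨⟨fun hfit => absurd hfit hnf, fun _ => ⟨?_, ?_, ?_, ?_⟩⟩, fun hfit => absurd hfit hnf⟩
      · first
          | exact w_rax
          | (rw [w_rax]; rfl)
      · refine hpre.inv.eqOn (by v_untouched) ?_
        rw [hbase, hlimit]
        u_memnorm
        u_eqon
      · v_untouched
      · u_same
    case cont =>
      -- after `malloc(k * s)`: NULL, or the new object, to be filled with zeros
      have hy : (u.reg .rdi).toNat = 0 ∨ (u.reg .rsi).toNat = 0 ∨
          ((u.reg .rdi).toNat ≤ 4194272 ∧ (u.reg .rsi).toNat ≤ 4194272) := by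
        apply Classical.byContradiction
        intro hn
        have := hno hn
        omega
      have hsmall := ProgX.Spec.mul_small hy
      have hprod : (u.reg .rdi * u.reg .rsi).toNat = (u.reg .rdi).toNat * (u.reg .rsi).toNat := by
        rw [UInt64.toNat_mul]
        exact Nat.mod_eq_of_lt hsmall
      obtain ⟨m, hm⟩ : ∃ m, (u.reg .rdi).toNat * (u.reg .rsi).toNat = m := ⟨_, rfl⟩
      rw [hm] at hmemset hprod hsmall
      have hn : (s_10351c.reg .rdi).toNat = m := by
        rw [w_rdi_10351c]
        exact hprod
      have hpost : ProgX.Spec.AllocPost H rest frames 32 m (r16 m) s_10351c s_10351cr := by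
        have this : ProgX.Spec.AllocPost H rest frames 32 (s_10351c.reg .rdi).toNat (r16 (s_10351c.reg .rdi).toNat) s_10351c s_10351cr :=
          w_post
        rw [hn] at this
        exact this
      clear w_post
      have e8 : (s_10351c.reg .rsp).toNat + 8 = (u.reg .rsp).toNat - 24 := by
        rw [w_rsp_10351c]
        u_omega
      obtain ⟨rv2, hrv2⟩ : ∃ rv2, s_10351cr.reg .rax = rv2 := ⟨_, rfl⟩
      v_after_call w_rsp_10351c w_mem_10351c
      simp only [shadowSpan, Heap.next_def, hbase, hn] at w_same
      have hq0 : UInt64.ofNat (s_10351cr.mem.readLE (u.reg .rsp) 8) = ret := by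
        u_frame he_retAddr
      have hp1 : UInt64.ofNat (s_10351c.mem.readLE (u.reg .rsp - 8) 8) = u.reg .rbp := by u_resolve
      have hq1 : UInt64.ofNat (s_10351cr.mem.readLE (u.reg .rsp - 8) 8) = u.reg .rbp := by
        rw [w_mem_10351c] at hp1
        u_frame hp1
      have hp2 : UInt64.ofNat (s_10351c.mem.readLE (u.reg .rsp - 16) 8) = u.reg .rbx := by u_resolve
      have hq2 : UInt64.ofNat (s_10351cr.mem.readLE (u.reg .rsp - 16) 8) = u.reg .rbx := by
        rw [w_mem_10351c] at hp2
        u_frame hp2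
      have hsame1 := w_same
      clear w_same
      by_cases hfit : H.Fits (r16 m)
      · obtain ⟨k1, k2⟩ := hpost.1 hfit
        rw [hrv2] at k1
        rw [e8] at k2
        obtain ⟨r1, r2, r3, r4, r5⟩ := hok.next_range hfit
        have hlive : (H.push m (r16 m)).Live rv2.toNat m := by
          rw [k1]
          exact Heap.live_push H m (r16 m)
        have hlc : (H.push m (r16 m)).LiveCap H.next m (r16 m) := Heap.liveCap_push H m (r16 m)
        have hnexteq : rv2.toNat = H.next := k1
        rw [Heap.next_def, hbase] at r1 r2 r3 r4 r5 k1
        rw [hlimit] at r3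
        have hbase' : (H.push m (r16 m)).base = 0x800000 := hbase
        have hlimit' : (H.push m (r16 m)).limit = 0xC00000 := hlimit
        have hlem := le_r16 m
        clear hno hyes hmemeq hpost
        u_walk hcode [hμ.vendor] span [ProgX.Base.L.textLo, ProgX.Base.L.textHi] side (v_side)
        case call_inv =>
          v_inv
        case pre_103534 =>
          -- the precondition of `memset(p, 0, m)`: the shadow clause over the new live list; `[p, p + m)` is the new object
          have et : (s_103534.reg .rsp).toNat + 8 = (u.reg .rsp).toNat - 24 := by
            rw [w_rsp]
            u_omega
          have step := k2.writeLE_out (u.reg .rsp - 32) 8 1062201 (by u_omega)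
            (by rw [hbase']; left; u_omega) (by left; u_omega)
          have hp' : ProgX.Base.Spec.HeapPre (H.push m (r16 m)) rest frames s_103534 :=
            ⟨by rw [w_mem, et]; exact step, hbase', hlimit', hpre.text, hpre.offText⟩
          refine ⟨hp'.shadowPre, Or.inr ?_⟩
          rw [w_rdi, w_rdx, hprod]
          exact hlive.liveIn rest frames (Nat.le_refl _) (Nat.le_refl _)
        case cont =>
          -- after `memset`: `mov rax, rbp ; add rsp, 8 ; pop rbx ; pop rbp ; ret`
          have et : (s_103534.reg .rsp).toNat + 8 = (u.reg .rsp).toNat - 24 := by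
            rw [w_rsp_103534]
            u_omega
          have step := k2.writeLE_out (u.reg .rsp - 32) 8 1062201 (by u_omega)
            (by rw [hbase']; left; u_omega) (by left; u_omega)
          rw [← w_mem_103534] at step
          obtain ⟨_, hun2, hzero⟩ := w_post
          rw [w_rdi_103534, w_rdx_103534, w_rsi_103534, hprod] at hzero
          v_after_call w_rsp_103534 w_mem_103534
          simp only [w_rdi_103534, w_rdx_103534, hprod, k1] at w_same
          have hinv3 : HeapInv (H.push m (r16 m)) rest frames ((u.reg .rsp).toNat - 24) s_103534r.mem := by
            rw [← w_mem_103534] at w_same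
            refine step.sameExcept hun2 w_same ?_
            intro w hw
            rcases List.mem_cons.mp hw with rfl | hw
            · left
              left
              rw [hbase']
              simp only
              u_omega
            · have e : w = ⟨8388608 + 32 + H.used + 32, 8388608 + 32 + H.used + 32 + m⟩ := List.mem_singleton.mp hw
              subst e
              right
              refine ⟨⟨H.next, m, r16 m, .live⟩, hlc, ?_, ?_⟩
              · simp only
                rw [Heap.next_def, hbase]
                exact Nat.le_refl _
              · simp only
                rw [Heap.next_def, hbase]
                omega
          have ht0 : UInt64.ofNat (s_103534r.mem.readLE (u.reg .rsp) 8) = ret := by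
            u_frame hq0
          have ht1 : UInt64.ofNat (s_103534r.mem.readLE (u.reg .rsp - 8) 8) = u.reg .rbp := by
            u_frame hq1
          have ht2 : UInt64.ofNat (s_103534r.mem.readLE (u.reg .rsp - 16) 8) = u.reg .rbx := by
            u_frame hq2
          u_walk hcode [hμ.vendor] span [ProgX.Base.L.textLo, ProgX.Base.L.textHi] side (v_side)
          refine ReachVia.done ?_
          v_returned
          · show ProgX.Spec.AllocPost H rest frames 96 ((u.reg .rdi).toNat * (u.reg .rsi).toNat)
                (r16 ((u.reg .rdi).toNat * (u.reg .rsi).toNat)) u _ ∧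
              (H.Fits (r16 ((u.reg .rdi).toNat * (u.reg .rsi).toNat)) →
                ∀ i, i < (u.reg .rdi).toNat * (u.reg .rsi).toNat → _)
            rw [hm]
            refine ⟨⟨fun _ => ⟨?_, ?_⟩, fun hnf => absurd hfit hnf⟩, fun _ => ?_⟩
            · rw [w_rax]
              exact hnexteq
            · rw [w_mem]
              exact hpre.raise_back hinv3 (by omega)
            · intro i hi
              have hz := hzero i hi
              have ea : UInt64.ofNat (H.next + i) = rv2 + UInt64.ofNat i := by
                rw [UInt64.ofNat_add, ← hnexteq, UInt64.ofNat_toNat]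
              rw [w_mem, ea, hz]
              rfl
          · simp only [X86.User.Spec.footprint, vspec, shadowSpan, Heap.next_def, hbase, hm]
            u_same
      · obtain ⟨k1, k2, k3, k4⟩ := hpost.2 hfit
        rw [hrv2] at k1
        rw [e8] at k2
        rw [w_rsp_10351c, w_mem_10351c] at k4
        clear hno hyes hmemeq hpost
        u_walk hcode [hμ.vendor] span [ProgX.Base.L.textLo, ProgX.Base.L.textHi] side (v_side)
        refine ReachVia.done ?_
        v_returned
        show ProgX.Spec.AllocPost H rest frames 96 ((u.reg .rdi).toNat * (u.reg .rsi).toNat)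
            (r16 ((u.reg .rdi).toNat * (u.reg .rsi).toNat)) u _ ∧
          (H.Fits (r16 ((u.reg .rdi).toNat * (u.reg .rsi).toNat)) →
            ∀ i, i < (u.reg .rdi).toNat * (u.reg .rsi).toNat → _)
        rw [hm]
        refine ⟨⟨fun h => absurd h hfit, fun _ => ⟨?_, ?_, ?_, ?_⟩⟩, fun h => absurd h hfit⟩
        · rw [w_rax]
          exact k1
        · rw [w_mem]
          exact hpre.raise_back k2 (by omega)
        · rw [w_mem]
          have hun : ShadowUntouched u.mem s_10351c.mem := by
            rw [w_mem_10351c]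
            v_untouched
          exact hun.trans k3
        · rw [w_mem]
          u_same
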